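-- pv_equiv track=rewrite | github.com/Emmanuell87/EjerciciosMisionTic2022Ciclo2 | PYTHON/Ejercicios_programacion_51/UNIDAD 3/ejemplo_minireto3.py | costo_anuncio
-- ===== SOURCE A (Python) =====
-- def costo_anuncio (mensajes:list)-> dict:
--     letrasEconomicas = ["f","i","j","k","l","r","t"]
--     precio = 0
--     resultado = {}
--     for i in mensajes:
--         for j in i:
--             if j in letrasEconomicas:
--                 precio = precio +50
--             else:
--                 precio = precio + 100
--         resultado[i] = precio
--         precio=0
--     return resultado
-- ===== SOURCE B (Python) =====
-- def costo_anuncio(mensajes: list) -> dict: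
--     resultado = {}
--     for m in mensajes:
--         resultado[m] = 100 * len(m) - 50 * sum(m.count(l) for l in "fijklrt")
--     return resultado
-- ===== Notes on version B (the rewrite author's own statement) =====
-- stated objective: alternative
-- what changed: Instead of classifying each character with an if/else price accumulator, B scans each message once per economical letter with str.count and prices it as 100*len(m) minus 50 per discount hit.
import Mathlib
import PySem

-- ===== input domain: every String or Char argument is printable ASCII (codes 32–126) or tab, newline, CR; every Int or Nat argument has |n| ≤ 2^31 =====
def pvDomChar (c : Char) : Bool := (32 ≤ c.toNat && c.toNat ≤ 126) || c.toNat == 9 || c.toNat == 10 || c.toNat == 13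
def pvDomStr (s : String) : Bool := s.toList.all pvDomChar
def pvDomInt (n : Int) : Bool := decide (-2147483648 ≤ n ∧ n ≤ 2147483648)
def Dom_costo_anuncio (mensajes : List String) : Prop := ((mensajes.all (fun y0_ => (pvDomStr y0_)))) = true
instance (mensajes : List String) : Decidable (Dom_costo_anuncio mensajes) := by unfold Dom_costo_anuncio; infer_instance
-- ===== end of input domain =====

-- B drops A's per-character if/else price accumulation entirely: it scans the message
-- once per economical LETTER with str.count and prices 100*len - 50*(discount hits); objective: alternative.

-- ===== PORT A =====
-- A's letrasEconomicas holds one-character strings and j ranges over the characters of i;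
-- 'j in letrasEconomicas' is membership of a 1-char string, exact as Char-list membership.
def pvLetrasEconomicas : List Char := ['f', 'i', 'j', 'k', 'l', 'r', 't']

def costo_anuncio (mensajes : List String) : List (String × Int) :=
  let step : (Int × PySem.Dict String Int) → String → (Int × PySem.Dict String Int) :=
    fun st i =>
      let precio := i.toList.foldl
        (fun p j => if pvLetrasEconomicas.contains j then p + 50 else p + 100) st.1
      (0, st.2.insert i precio)
  ((mensajes.foldl step (0, PySem.Dict.empty)).2).items

-- ===== PORT B =====
-- m.count(l) is PySem.Chars.count on the code points (exact; l is a single character)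
def costo_anuncio_alt (mensajes : List String) : List (String × Int) :=
  (mensajes.foldl
    (fun (d : PySem.Dict String Int) m =>
      d.insert m (100 * (m.toList.length : Int)
        - 50 * (("fijklrt".toList.map
            (fun l => (PySem.Chars.count m.toList [l] : Int))).sum)))
    PySem.Dict.empty).items

-- ===== PRECONDITION & SPEC =====
def Spec_costo_anuncio (mensajes : List String) (out : List (String × Int)) : Prop := out = costo_anuncio_alt mensajes
instance (mensajes : List String) (out : List (String × Int)) : Decidable (Spec_costo_anuncio mensajes out) := by unfold Spec_costo_anuncio; infer_instance

-- ===== CLAIM =====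
def Claim_equal_costo_anuncio : Prop := ∀ (mensajes : List String), Dom_costo_anuncio mensajes → Spec_costo_anuncio mensajes (costo_anuncio mensajes)

-- ===== LEMMAS AND PROOFS =====

-- Chars.count with a single-character needle is plain character count
lemma go_count (c : Char) (l : List Char) (fuel acc : ℕ) (h : l.length ≤ fuel) :
    PySem.Chars.count.go [c] fuel l acc = acc + l.count c := by
  induction l generalizing fuel acc with
  | nil => cases fuel <;> simp [PySem.Chars.count.go]
  | cons x t ih =>
    cases fuel with
    | zero => simp at h
    | succ f =>
      have ht : t.length ≤ f := by simpa using h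
      by_cases hx : c = x
      · subst hx
        simp [PySem.Chars.count.go, List.isPrefixOf, ih f (acc + 1) ht]
        omega
      · simp [PySem.Chars.count.go, List.isPrefixOf, Ne.symm hx, hx, ih f acc ht]

lemma count_singleton (c : Char) (s : List Char) :
    PySem.Chars.count s [c] = s.count c := by
  simp [PySem.Chars.count, go_count c s s.length 0 le_rfl]

-- counting a disjoint 'or' splits off the single-char count
lemma countP_or (l : Char) (q : Char → Bool) (hq : q l = false) (cs : List Char) :
    cs.countP (fun c => c == l || q c) = cs.count l + cs.countP q := by
  induction cs with
  | nil => simp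
  | cons c cs ih =>
    by_cases hc : c = l
    · subst hc
      simp [hq, ih]
      omega
    · simp only [List.countP_cons, List.count_cons, beq_iff_eq, hc, if_false, ih]
      by_cases hqc : q c = true <;> simp [hqc, hc] <;> omega

-- summing per-letter counts over distinct letters is one membership count
lemma sum_count (letters : List Char) (hnd : letters.Nodup) (cs : List Char) :
    (letters.map (fun l => cs.count l)).sum = cs.countP (fun c => letters.contains c) := by
  induction letters with
  | nil => simp
  | cons l ls ih =>
    have hnotin : ls.contains l = false := by
      simpa using (List.nodup_cons.mp hnd).1
    have hih := ih (List.nodup_cons.mp hnd).2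
    simp only [List.map_cons, List.sum_cons, hih]
    rw [show (fun c => (l :: ls).contains c) = (fun c => c == l || ls.contains c) by
      funext c; by_cases hc : c = l <;> simp [hc]]
    rw [countP_or l (fun c => ls.contains c) hnotin cs]

-- B's per-letter Int sum equals the membership count of A's economical letters
lemma sum_eq (cs : List Char) :
    ("fijklrt".toList.map (fun l => (PySem.Chars.count cs [l] : Int))).sum
      = ((cs.countP (fun c => pvLetrasEconomicas.contains c) : Int)) := by
  have h1 : "fijklrt".toList = pvLetrasEconomicas := by decide
  have h2 := sum_count pvLetrasEconomicas (by decide) cs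
  rw [h1, ← h2]
  simp only [count_singleton]
  push_cast
  rfl

-- A's inner character loop computes B's per-message price
lemma char_loop (cs : List Char) (p : Int) :
    cs.foldl (fun p j => if pvLetrasEconomicas.contains j then p + 50 else p + 100) p
      = p + (100 * (cs.length : Int)
          - 50 * (("fijklrt".toList.map (fun l => (PySem.Chars.count cs [l] : Int))).sum)) := by
  rw [sum_eq]
  induction cs generalizing p with
  | nil => simp
  | cons c cs ih =>
    simp only [List.foldl_cons, List.countP_cons, List.length_cons]
    rw [ih]
    by_cases h : pvLetrasEconomicas.contains c = true <;>
      simp only [h, if_true, if_false, Bool.false_eq_true] <;> push_cast <;> ring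

-- the pair fold keeps accumulator 0 and builds B's dict
lemma fold_pair (mensajes : List String) (d : PySem.Dict String Int) :
    mensajes.foldl
      (fun (st : Int × PySem.Dict String Int) i =>
        let precio := i.toList.foldl
          (fun p j => if pvLetrasEconomicas.contains j then p + 50 else p + 100) st.1
        (0, st.2.insert i precio)) (0, d)
      = (0, mensajes.foldl
          (fun (d : PySem.Dict String Int) m =>
            d.insert m (100 * (m.toList.length : Int)
              - 50 * (("fijklrt".toList.map
                  (fun l => (PySem.Chars.count m.toList [l] : Int))).sum))) d) := by
  induction mensajes generalizing d with
  | nil => rfl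
  | cons m ms ih =>
    simp only [List.foldl_cons]
    rw [char_loop]
    simp only [zero_add]
    exact ih _

-- ===== VERDICT =====
theorem costo_anuncio_spec : Claim_equal_costo_anuncio := by
  intro mensajes _
  unfold Spec_costo_anuncio costo_anuncio costo_anuncio_alt
  simp only [fold_pair]
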